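-- pv_equiv track=rewrite | github.com/IanBriggs/megalibm | measurement/error/scripts/plot_error.py | to_eps_del
-- ===== SOURCE A (Python) =====
-- def to_eps_del(abs_err, rel_err):
--     """
--     Turn the lists of absolute and relative errors into all pairs of epsilon
--     and delta that can describe the error of the function.
--
--     Keyword arguments:
--     abs_err -- list of maximum absolute errors over contiguous regions
--     rel_err -- list of maximum relative errors over the same regions
--     """
--     # Keep the pairing of absolute and relative error
--     both = list(zip(rel_err, abs_err))
--
--     # Sort so we get increasing absolute error with any ties sorted by
--     # relative error
--     both.sort(key=lambda t: t[0])
--     both.sort(key=lambda t: t[1])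
--
--     # Delta errors are the absolute errors
--     delt = [t[1] for t in both][:-1]
--
--     # The corresponging epsilon will be the maximum of the relative errors to
--     # the right of the same index
--     rel_err = [t[0] for t in both]
--     epsi = list()
--     cur = max(rel_err[1:])
--     for i in range(len(delt)):
--         # The max will always be the same until we reach that maximum element
--         if cur == rel_err[i]:
--             cur = max(rel_err[i+1:])
--         epsi.append(cur)
--     return delt, epsi
-- ===== SOURCE B (Python) =====
-- def to_eps_del(abs_err, rel_err):
--     # Same pairing and stable double sort as the spec requires (abs asc, ties rel asc)
--     both = list(zip(rel_err, abs_err))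
--     both.sort(key=lambda t: t[0])
--     both.sort(key=lambda t: t[1])
--     delt = [a for _, a in both[:-1]]
--     # epsilon = suffix maxima of the relative errors, one reverse pass
--     epsi = []
--     cur = None
--     for r, _ in reversed(both[1:]):
--         if cur is None or r > cur:
--             cur = r
--         epsi.append(cur)
--     epsi.reverse()
--     return delt, epsi
-- ===== Notes on version B (the rewrite author's own statement) =====
-- stated objective: faster
-- what changed: B replaces A's repeated max(rel_err[i+1:]) rescans inside the index loop by a single reverse pass that accumulates the running suffix maximum of the relative errors (and builds delt directly from the sorted pairs), so the post-sort work drops from O(n^2) worst case to O(n).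
-- outside the precondition, e.g. on to_eps_del([3], [5]): A raises ValueError, B returns ([], []); on to_eps_del([], []): A raises ValueError, B returns ([], [])
-- crash fix: When fewer than two (rel, abs) pairs exist (min(len(abs_err), len(rel_err)) <= 1) A raises ValueError from max() on an empty slice; B returns ([], []). — e.g. on to_eps_del([3], [5]): A raises ValueError, B returns ([], [])
import Mathlib
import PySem

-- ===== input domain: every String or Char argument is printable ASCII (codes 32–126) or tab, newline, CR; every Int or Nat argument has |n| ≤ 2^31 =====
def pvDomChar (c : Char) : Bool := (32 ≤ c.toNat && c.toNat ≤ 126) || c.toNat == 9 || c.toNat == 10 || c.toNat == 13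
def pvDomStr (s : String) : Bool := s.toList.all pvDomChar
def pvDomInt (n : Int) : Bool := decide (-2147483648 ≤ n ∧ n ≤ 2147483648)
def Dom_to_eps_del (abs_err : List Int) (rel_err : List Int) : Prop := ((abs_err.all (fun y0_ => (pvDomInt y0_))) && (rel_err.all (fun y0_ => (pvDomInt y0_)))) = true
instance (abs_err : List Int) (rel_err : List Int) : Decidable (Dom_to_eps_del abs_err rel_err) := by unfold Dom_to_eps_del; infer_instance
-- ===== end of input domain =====

-- B replaces A's repeated max(rel_err[i+1:]) rescans by one reverse pass accumulating the
-- running suffix maximum (objective: faster post-sort work, O(n) instead of O(n^2) worst case).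

-- ===== PORT A =====
def to_eps_del (abs_err : List Int) (rel_err : List Int) : List Int × List Int :=
  -- both = list(zip(rel_err, abs_err)); both.sort(key=t[0]); both.sort(key=t[1])
  let both0 := List.zip rel_err abs_err
  let both1 := PySem.List.sorted both0 (fun t => t.1)
  let both := PySem.List.sorted both1 (fun t => t.2)
  -- delt = [t[1] for t in both][:-1]
  let delt := PySem.List.slice (both.map (fun t => t.2)) none (some (-1))
  -- rel_err = [t[0] for t in both]
  let rel := both.map (fun t => t.1)
  -- cur = max(rel_err[1:])  — Python raises ValueError on an empty slice; excluded by Pre_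
  match PySem.List.max? (PySem.List.slice rel (some 1) none) (fun y => y) with
  | none => ([], [])
  | some c =>
    -- for i in range(len(delt)): if cur == rel_err[i]: cur = max(rel_err[i+1:]); epsi.append(cur)
    let st := (PySem.List.pyRange 0 ((delt.length : Int)) 1).foldl
      (fun (st : List Int × Int) i =>
        let cur := if st.2 = PySem.List.pyGetD rel i 0 then
            (PySem.List.max? (PySem.List.slice rel (some (i + 1)) none) (fun y => y)).getD st.2
          else st.2
        (st.1 ++ [cur], cur)) ([], c)
    (delt, st.1)

-- ===== PORT B =====
def to_eps_del_alt (abs_err : List Int) (rel_err : List Int) : List Int × List Int :=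
  let both0 := List.zip rel_err abs_err
  let both1 := PySem.List.sorted both0 (fun t => t.1)
  let both := PySem.List.sorted both1 (fun t => t.2)
  -- delt = [a for _, a in both[:-1]]   (both[:-1] = dropLast)
  let delt := both.dropLast.map (fun t => t.2)
  -- for r, _ in reversed(both[1:]): if cur is None or r > cur: cur = r; epsi.append(cur)
  let st := (both.tail.reverse).foldl
    (fun (st : List Int × Option Int) t =>
      let cur := match st.2 with
        | none => t.1
        | some c => if t.1 > c then t.1 else c
      (st.1 ++ [cur], some cur)) (([] : List Int), (none : Option Int))
  -- epsi.reverse()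
  (delt, st.1.reverse)

-- ===== PRECONDITION & SPEC =====
-- Pre_ excludes exactly the inputs where A raises: with fewer than two zipped pairs,
-- max(rel_err[1:]) is taken over an empty list (ValueError).
def Pre_to_eps_del (abs_err : List Int) (rel_err : List Int) : Prop :=
  2 ≤ abs_err.length ∧ 2 ≤ rel_err.length
instance (abs_err : List Int) (rel_err : List Int) : Decidable (Pre_to_eps_del abs_err rel_err) := by
  unfold Pre_to_eps_del; infer_instance
def pvWitness_to_eps_del : List Int × List Int := ([0, 1], [2, 3])

-- When min(len(abs_err), len(rel_err)) <= 1, A raises ValueError (max of empty slice); B returns ([], []).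
def Raises_to_eps_del (abs_err : List Int) (rel_err : List Int) : Prop :=
  abs_err.length ≤ 1 ∨ rel_err.length ≤ 1
instance (abs_err : List Int) (rel_err : List Int) : Decidable (Raises_to_eps_del abs_err rel_err) := by
  unfold Raises_to_eps_del; infer_instance
def pvRaiseWitness_to_eps_del : List Int × List Int := ([3], [5])
def pvRaiseWitnessOut_to_eps_del : List Int × List Int := ([], [])

def Spec_to_eps_del (abs_err : List Int) (rel_err : List Int) (out : List Int × List Int) : Prop := out = to_eps_del_alt abs_err rel_err
instance (abs_err : List Int) (rel_err : List Int) (out : List Int × List Int) : Decidable (Spec_to_eps_del abs_err rel_err out) := by unfold Spec_to_eps_del; infer_instance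

-- ===== CLAIM (what is proved, stated in full; the proofs are below) =====
def Claim_equal_to_eps_del : Prop := ∀ (abs_err : List Int) (rel_err : List Int), Dom_to_eps_del abs_err rel_err → Pre_to_eps_del abs_err rel_err → Spec_to_eps_del abs_err rel_err (to_eps_del abs_err rel_err)

def Claim_raises_to_eps_del : Prop := (∀ (abs_err : List Int) (rel_err : List Int), Dom_to_eps_del abs_err rel_err → Raises_to_eps_del abs_err rel_err → ¬ Pre_to_eps_del abs_err rel_err) ∧ (Dom_to_eps_del (pvRaiseWitness_to_eps_del.1) (pvRaiseWitness_to_eps_del.2) ∧ Raises_to_eps_del (pvRaiseWitness_to_eps_del.1) (pvRaiseWitness_to_eps_del.2) ∧ to_eps_del_alt (pvRaiseWitness_to_eps_del.1) (pvRaiseWitness_to_eps_del.2) = pvRaiseWitnessOut_to_eps_del)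

-- ===== LEMMAS AND PROOFS =====

-- max of a nonempty list, as Python's max() computes it (junk 0 on [])
def maxO : List Int → Int
  | [] => 0
  | x :: t => t.foldl max x

lemma foldl_max_shift (t : List Int) : ∀ (a b : Int), t.foldl max (max a b) = max a (t.foldl max b) := by
  induction t with
  | nil => intro a b; rfl
  | cons x t ih =>
    intro a b
    simp only [List.foldl_cons]
    rw [max_assoc, ih]

lemma maxO_cons_cons (a b : Int) (t : List Int) : maxO (a :: b :: t) = max a (maxO (b :: t)) := by
  simp only [maxO, List.foldl_cons]
  exact foldl_max_shift t a b

lemma max?_id_eq (x : Int) (t : List Int) :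
    PySem.List.max? (x :: t) (fun y => y) = some (maxO (x :: t)) := by
  rw [PySem.List.max?_id_cons]; rfl

-- A's loop invariant: cur is the max of the suffix at (or just after) the current index,
-- and each appended value is the max of the strict suffix.
lemma loopA (r : List Int) (k : Nat) : ∀ (j : Nat) (cur : Int) (acc : List Int),
    j + k + 1 ≤ r.length →
    (cur = maxO (r.drop (j+1)) ∨ cur = maxO (r.drop j)) →
    (PySem.List.pyRange (j : Int) ((j : Int) + (k : Int)) 1).foldl
      (fun (st : List Int × Int) i =>
        let cur := if st.2 = PySem.List.pyGetD r i 0 then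
            (PySem.List.max? (PySem.List.slice r (some (i + 1)) none) (fun y => y)).getD st.2
          else st.2
        (st.1 ++ [cur], cur)) (acc, cur)
      = (acc ++ (List.range k).map (fun t => maxO (r.drop (j+t+1))),
         if k = 0 then cur else maxO (r.drop (j+k))) := by
  induction k with
  | zero =>
    intro j cur acc _ _
    rw [show ((j : Int) + ((0:Nat) : Int)) = (j : Int) by push_cast; ring]
    rw [PySem.List.pyRange_one_eq_nil (le_refl _)]
    simp
  | succ k ih =>
    intro j cur acc hlen hcur
    have hjlen : j + 1 < r.length := by omega
    have hcons : PySem.List.pyRange (j : Int) ((j : Int) + ((k+1:Nat) : Int)) 1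
        = (j : Int) :: PySem.List.pyRange ((j : Int) + 1) ((j : Int) + ((k+1:Nat) : Int)) 1 := by
      apply PySem.List.pyRange_one_cons
      push_cast; omega
    rw [hcons, List.foldl_cons]
    have hget : PySem.List.pyGetD r (j : Int) 0 = r[j]'(by omega) := by
      rw [PySem.List.pyGetD_natCast, List.getD_eq_getElem _ _ (by omega)]
    have hslice : PySem.List.slice r (some ((j : Int) + 1)) none = r.drop (j+1) := by
      rw [show ((j : Int) + 1) = (((j+1 : Nat)) : Int) by push_cast; ring]
      exact PySem.List.slice_from_natCast r (j+1)
    obtain ⟨x, t, hxt⟩ : ∃ x t, r.drop (j+1) = x :: t := by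
      cases h : r.drop (j+1) with
      | nil =>
        exfalso
        have := List.length_drop (l := r) (i := j+1)
        rw [h] at this
        simp at this
        omega
      | cons x t => exact ⟨x, t, rfl⟩
    have hmax : (PySem.List.max? (PySem.List.slice r (some ((j : Int) + 1)) none) (fun y => y))
        = some (maxO (r.drop (j+1))) := by
      rw [hslice, hxt, max?_id_eq, ← hxt]
    have hdropj : r.drop j = r[j]'(by omega) :: r.drop (j+1) := List.drop_eq_getElem_cons (by omega)
    have hcur' : (if cur = PySem.List.pyGetD r (j : Int) 0 then
            (PySem.List.max? (PySem.List.slice r (some ((j : Int) + 1)) none) (fun y => y)).getD cur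
          else cur) = maxO (r.drop (j+1)) := by
      rw [hget, hmax]
      rcases hcur with h | h
      · split <;> simp [h]
      · split
        · simp
        · rename_i hne
          have hmm : maxO (r.drop j) = max (r[j]'(by omega)) (maxO (r.drop (j+1))) := by
            rw [hdropj, hxt, maxO_cons_cons, ← hxt]
          rcases max_choice (r[j]'(by omega)) (maxO (r.drop (j+1))) with hm | hm
          · exact absurd (h.trans (hmm.trans hm)) hne
          · exact h.trans (hmm.trans hm)
    dsimp only
    rw [hcur']
    have hrange : PySem.List.pyRange ((j : Int) + 1) ((j : Int) + ((k+1:Nat) : Int)) 1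
        = PySem.List.pyRange (((j+1:Nat)) : Int) ((((j+1:Nat)) : Int) + ((k:Nat) : Int)) 1 := by
      push_cast; ring_nf
    rw [hrange]
    rw [ih (j+1) (maxO (r.drop (j+1))) (acc ++ [maxO (r.drop (j+1))]) (by omega) (Or.inr rfl)]
    refine Prod.ext ?_ ?_
    · dsimp only
      rw [List.append_assoc, List.singleton_append, List.range_succ_eq_map, List.map_cons,
        List.map_map]
      have h0 : maxO (r.drop (j+0+1)) = maxO (r.drop (j+1)) := by norm_num
      have hmapeq : List.map ((fun t => maxO (r.drop (j + t + 1))) ∘ Nat.succ) (List.range k)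
          = List.map (fun t => maxO (r.drop (j + 1 + t + 1))) (List.range k) := by
        apply List.map_congr_left
        intro t _
        show maxO (r.drop (j + (t+1) + 1)) = maxO (r.drop (j + 1 + t + 1))
        rw [show j + (t+1) + 1 = j + 1 + t + 1 from by omega]
      rw [h0, hmapeq]
    · dsimp only
      by_cases hk : k = 0
      · subst hk; norm_num
      · rw [if_neg hk, if_neg (by omega)]
        rw [show j + 1 + k = j + (k+1) from by omega]

-- B's reverse pass: the accumulated list is the reversed list of suffix maxima of the
-- first components, and the carried Option is the running maximum.
def sufP : List (Int × Int) → List Int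
  | [] => []
  | x :: xs => maxO ((x :: xs).map (fun t => t.1)) :: sufP xs

def omax : List Int → Option Int
  | [] => none
  | x :: t => some (maxO (x :: t))

lemma loopB (l : List (Int × Int)) :
    (l.reverse.foldl (fun (st : List Int × Option Int) t =>
      let cur := match st.2 with
        | none => t.1
        | some c => if t.1 > c then t.1 else c
      (st.1 ++ [cur], some cur)) (([] : List Int), (none : Option Int)))
    = ((sufP l).reverse, omax (l.map (fun t => t.1))) := by
  induction l with
  | nil => rfl
  | cons x l ih =>
    rw [List.reverse_cons, List.foldl_append, ih, List.foldl_cons, List.foldl_nil]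
    cases l with
    | nil => simp [sufP, omax, maxO]
    | cons y t =>
      have hM : (match omax (((y :: t)).map (fun t => t.1)) with
          | none => x.1
          | some c => if x.1 > c then x.1 else c) = maxO (((x :: y :: t)).map (fun t => t.1)) := by
        simp only [List.map_cons, omax]
        rw [maxO_cons_cons]
        rcases lt_or_ge (maxO (y.1 :: t.map (fun t => t.1))) x.1 with h | h
        · rw [if_pos h, max_eq_left (le_of_lt h)]
        · rw [if_neg (not_lt.mpr h), max_eq_right h]
      dsimp only
      rw [hM]
      refine Prod.ext ?_ ?_
      · dsimp only
        rw [show sufP (x :: y :: t) = maxO (((x :: y :: t)).map (fun t => t.1)) :: sufP (y :: t) from rfl]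
        rw [List.reverse_cons]
      · simp only [List.map_cons, omax]

lemma sufP_eq (l : List (Int × Int)) :
    sufP l = (List.range l.length).map (fun t => maxO ((l.drop t).map (fun p => p.1))) := by
  induction l with
  | nil => rfl
  | cons x l ih =>
    rw [show sufP (x :: l) = maxO (((x :: l)).map (fun t => t.1)) :: sufP l from rfl, ih]
    rw [List.length_cons, List.range_succ_eq_map]
    simp only [List.map_cons, List.map_map]
    congr 1



lemma tail_toDrop (L : List ((Int) × (Int))) (t : Nat) : L.tail.drop t = L.drop (t+1) := by
  rw [← List.drop_one, List.drop_drop, Nat.add_comm]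

theorem to_eps_del_spec : Claim_equal_to_eps_del := by
  intro abs_err rel_err _ hpre
  rcases hpre with ⟨ha, hb⟩
  unfold Spec_to_eps_del
  have hLlen : 2 ≤ (PySem.List.sorted (PySem.List.sorted (List.zip rel_err abs_err)
      (fun t => t.1)) (fun t => t.2)).length := by
    rw [PySem.List.length_sorted, PySem.List.length_sorted, List.length_zip]
    omega
  set L := PySem.List.sorted (PySem.List.sorted (List.zip rel_err abs_err)
      (fun t => t.1)) (fun t => t.2) with hLdef
  -- the common normal form of both results
  set r := L.map (fun t => t.1) with hrdef
  have hrlen : r.length = L.length := by rw [hrdef, List.length_map]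
  set E := (List.range (L.length - 1)).map (fun t => maxO (r.drop (t+1))) with hEdef
  have hrtail : ∃ x s, r.tail = x :: s := by
    cases h : r.tail with
    | nil =>
      exfalso
      have := List.length_tail (l := r)
      rw [h] at this
      simp at this
      omega
    | cons x s => exact ⟨x, s, rfl⟩
  obtain ⟨x, s, hxs⟩ := hrtail
  have hxs' : x :: s = r.drop 1 := by rw [← hxs, List.drop_one]
  -- A's side
  have hA : to_eps_del abs_err rel_err = (L.dropLast.map (fun t => t.2), E) := by
    unfold to_eps_del
    dsimp only
    rw [← hLdef, ← hrdef]
    rw [PySem.List.slice_from_one, hxs, max?_id_eq]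
    dsimp only
    rw [PySem.List.slice_to_neg_one, ← List.map_dropLast]
    have hdlen : ((L.dropLast).map (fun t => t.2)).length = L.length - 1 := by
      rw [List.length_map, List.length_dropLast]
    rw [hdlen]
    have hinv : maxO (x :: s) = maxO (r.drop (0+1)) := by rw [hxs']
    have h := loopA r (L.length - 1) 0 (maxO (x :: s)) [] (by omega) (Or.inl hinv)
    norm_num at h
    rw [h, hEdef]
  -- B's side
  have hB : to_eps_del_alt abs_err rel_err = (L.dropLast.map (fun t => t.2), E) := by
    unfold to_eps_del_alt
    dsimp only
    rw [← hLdef]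
    rw [loopB]
    dsimp only
    rw [List.reverse_reverse, sufP_eq, List.length_tail]
    refine congrArg (Prod.mk _) ?_
    rw [hEdef]
    apply List.map_congr_left
    intro t _
    rw [tail_toDrop, hrdef, List.map_drop]
  rw [hA, hB]

theorem to_eps_del_raises : Claim_raises_to_eps_del := by
  unfold Claim_raises_to_eps_del
  constructor
  · intro abs_err rel_err _ hr hp
    rcases hp with ⟨h1, h2⟩
    rcases hr with h | h <;> omega
  · exact ⟨by decide, by decide, by decide⟩

-- witness self-check: the raise witness is inside Raises_ and B's port returns the stated literal there
theorem pvRaiseWitness_to_eps_del_ok :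
    Raises_to_eps_del pvRaiseWitness_to_eps_del.1 pvRaiseWitness_to_eps_del.2 ∧
    to_eps_del_alt pvRaiseWitness_to_eps_del.1 pvRaiseWitness_to_eps_del.2 = pvRaiseWitnessOut_to_eps_del :=
  ⟨to_eps_del_raises.2.2.1, to_eps_del_raises.2.2.2⟩
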